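-- pv_equiv track=rewrite | github.com/kang39/python_games | baskin31_countdown/baskin31.py | ai_decide
-- ===== SOURCE A (Python) =====
-- def ai_decide(current_num, previous_num):
--     winning_num = [6, 10, 14, 18, 22, 26, 30]
--     possible_moves = [1, 2, 3]
--     possible_moves.remove(previous_num)
--     for move in possible_moves:
--         if current_num + move in winning_num:
--             return move
--     if current_num == 28:
--         return min(possible_moves)
--     else:
--         return max(possible_moves)
-- ===== SOURCE B (Python) =====
-- def ai_decide(current_num, previous_num):
--     # remaining moves after the opponent's move (KeyError on an invalid move)
--     smallest, largest = {1: (2, 3), 2: (1, 3), 3: (1, 2)}[previous_num]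
--     # Winning totals are exactly t with 6 <= t <= 30 and t % 4 == 2, so the only
--     # candidate winning move is w = (2 - current_num) % 4 (moves 4 apart can't both win).
--     w = (2 - current_num) % 4
--     if w != 0 and w != previous_num and 6 <= current_num + w <= 30:
--         return w
--     return smallest if current_num == 28 else largest
-- ===== Notes on version B (the rewrite author's own statement) =====
-- stated objective: simpler
-- what changed: B drops A's winning_num table, list loop, remove and min/max: it computes the unique candidate winning move in closed form as (2 - current_num) % 4, checks it is a legal non-repeated move landing in [6,30], and otherwise takes the (smallest, largest) remaining moves from a 3-entry dict keyed by previous_num.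
import Mathlib
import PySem

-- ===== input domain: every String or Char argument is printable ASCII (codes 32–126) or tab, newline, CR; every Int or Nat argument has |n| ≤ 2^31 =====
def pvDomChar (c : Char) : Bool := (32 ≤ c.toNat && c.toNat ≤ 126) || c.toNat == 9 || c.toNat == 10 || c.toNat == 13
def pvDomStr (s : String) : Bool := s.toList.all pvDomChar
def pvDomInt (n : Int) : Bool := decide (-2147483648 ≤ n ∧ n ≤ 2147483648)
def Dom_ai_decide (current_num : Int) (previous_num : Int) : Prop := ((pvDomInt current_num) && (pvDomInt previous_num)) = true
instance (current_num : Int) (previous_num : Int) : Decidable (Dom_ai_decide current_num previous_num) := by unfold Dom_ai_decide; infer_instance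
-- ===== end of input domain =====

-- B replaces A's lookup table, list loop and min/max with closed-form arithmetic: the unique
-- candidate winning move is (2 - current_num) % 4 and the fallback move is computed from
-- previous_num directly (simpler; return-value equivalence on Pre_, A mutates only locals).


-- ===== PORT A =====
-- the 'for move in possible_moves: if current_num + move in winning_num: return move' loop
def aiLoop (current_num : Int) : List Int → Option Int
  | [] => none
  | m :: rest =>
      if current_num + m ∈ [(6:Int), 10, 14, 18, 22, 26, 30] then some m
      else aiLoop current_num rest

def ai_decide (current_num : Int) (previous_num : Int) : Int :=
  match PySem.List.remove? [(1:Int), 2, 3] previous_num with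
  | none => 0  -- ValueError (possible_moves.remove fails); excluded by Pre_ai_decide
  | some possible_moves =>
      match aiLoop current_num possible_moves with
      | some m => m
      | none =>
          if current_num = 28 then (PySem.List.min? possible_moves (fun x => x)).getD 0
          else (PySem.List.max? possible_moves (fun x => x)).getD 0

-- ===== PORT B =====
def ai_decide_alt (current_num : Int) (previous_num : Int) : Int :=
  match PySem.Dict.get? (PySem.Dict.ofList [((1:Int), ((2:Int), (3:Int))), (2, (1, 3)), (3, (1, 2))]) previous_num with
  | none => 0  -- KeyError (invalid previous move); excluded by Pre_ai_decide
  | some (smallest, largest) =>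
      let w := PySem.Int.mod (2 - current_num) 4
      if w ≠ 0 ∧ w ≠ previous_num ∧ 6 ≤ current_num + w ∧ current_num + w ≤ 30 then w
      else if current_num = 28 then smallest else largest

-- ===== PRECONDITION & SPEC =====
-- Pre_ excludes exactly the inputs where A's list.remove raises ValueError (previous_num ∉ {1,2,3}).
def Pre_ai_decide (current_num : Int) (previous_num : Int) : Prop :=
  previous_num = 1 ∨ previous_num = 2 ∨ previous_num = 3
instance (current_num : Int) (previous_num : Int) : Decidable (Pre_ai_decide current_num previous_num) := by unfold Pre_ai_decide; infer_instance
def pvWitness_ai_decide : Int × Int := (7, 2)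

def Spec_ai_decide (current_num : Int) (previous_num : Int) (out : Int) : Prop := out = ai_decide_alt current_num previous_num
instance (current_num : Int) (previous_num : Int) (out : Int) : Decidable (Spec_ai_decide current_num previous_num out) := by unfold Spec_ai_decide; infer_instance

-- ===== CLAIM (what is proved, stated in full; the proofs are below) =====
def Claim_equal_ai_decide : Prop := ∀ (current_num : Int) (previous_num : Int), Dom_ai_decide current_num previous_num → Pre_ai_decide current_num previous_num → Spec_ai_decide current_num previous_num (ai_decide current_num previous_num)
-- ===== LEMMAS AND PROOFS =====
lemma mod4_emod (t : Int) : PySem.Int.mod t 4 = t.emod 4 :=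
  PySem.Int.mod_eq_emod_of_pos (by norm_num)

-- ===== VERDICT (by name: the statement is the Claim_ definition above) =====
theorem ai_decide_spec : Claim_equal_ai_decide := by
  intro c p _ hpre
  unfold Spec_ai_decide ai_decide ai_decide_alt
  have h0 : 0 ≤ (2 - c).emod 4 := Int.emod_nonneg _ (by norm_num)
  have h1 : (2 - c).emod 4 < 4 := Int.emod_lt_of_pos _ (by norm_num)
  have h2 : 4 * ((2 - c) / 4) + (2 - c).emod 4 = 2 - c := Int.ediv_add_emod _ _
  rcases hpre with h | h | h <;> subst h
  · rw [show PySem.Dict.get? (PySem.Dict.ofList [((1:Int), ((2:Int), (3:Int))), (2, (1, 3)), (3, (1, 2))]) 1 = some (2, 3) from by decide,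
      show PySem.List.remove? [(1:Int), 2, 3] 1 = some [2, 3] from by decide]
    simp only [aiLoop, mod4_emod, List.mem_cons, List.not_mem_nil, or_false,
      show (PySem.List.min? [(2:Int), 3] (fun x => x)) = some 2 from by decide,
      show (PySem.List.max? [(2:Int), 3] (fun x => x)) = some 3 from by decide]
    split_ifs <;> simp only [Option.getD_some] <;> omega
  · rw [show PySem.Dict.get? (PySem.Dict.ofList [((1:Int), ((2:Int), (3:Int))), (2, (1, 3)), (3, (1, 2))]) 2 = some (1, 3) from by decide,
      show PySem.List.remove? [(1:Int), 2, 3] 2 = some [1, 3] from by decide]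
    simp only [aiLoop, mod4_emod, List.mem_cons, List.not_mem_nil, or_false,
      show (PySem.List.min? [(1:Int), 3] (fun x => x)) = some 1 from by decide,
      show (PySem.List.max? [(1:Int), 3] (fun x => x)) = some 3 from by decide]
    split_ifs <;> simp only [Option.getD_some] <;> omega
  · rw [show PySem.Dict.get? (PySem.Dict.ofList [((1:Int), ((2:Int), (3:Int))), (2, (1, 3)), (3, (1, 2))]) 3 = some (1, 2) from by decide,
      show PySem.List.remove? [(1:Int), 2, 3] 3 = some [1, 2] from by decide]
    simp only [aiLoop, mod4_emod, List.mem_cons, List.not_mem_nil, or_false,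
      show (PySem.List.min? [(1:Int), 2] (fun x => x)) = some 1 from by decide,
      show (PySem.List.max? [(1:Int), 2] (fun x => x)) = some 2 from by decide]
    split_ifs <;> simp only [Option.getD_some] <;> omega
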